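-- pv_equiv track=rewrite | github.com/Suraj-KD/HackerRank | python/string/door_mate.py | design
-- ===== SOURCE A (Python) =====
-- def design(R, C):
--     lines = list()
--
--     for n in range(1, R//2 + 1):
--         line = ('.|.' * (n*2-1)).center(C, '-')
--         lines.append(line)
--
--     lines.append('WELCOME'.center(C, '-'))
--     lines.extend(reversed(lines[:-1]))
--     return lines
-- ===== SOURCE B (Python) =====
-- def design(R, C):
--     h = R // 2
--     lines = []
--     for i in range(2*h + 1):
--         if i == h:
--             lines.append('WELCOME'.center(C, '-'))
--         else:
--             n = (i if i < h else 2*h - i) + 1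
--             lines.append(('.|.' * (2*n - 1)).center(C, '-'))
--     return lines
-- ===== Notes on version B (the rewrite author's own statement) =====
-- stated objective: alternative
-- what changed: B replaces A's build-top-half-then-append-reversed-mirror with a single symmetric pass over range(2*(R//2)+1) that derives each line from its distance to the middle row; no intermediate list is sliced or reversed.
-- outside the precondition, e.g. on design(-2, 5): A returns ['WELCOME'], B returns []
import Mathlib
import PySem

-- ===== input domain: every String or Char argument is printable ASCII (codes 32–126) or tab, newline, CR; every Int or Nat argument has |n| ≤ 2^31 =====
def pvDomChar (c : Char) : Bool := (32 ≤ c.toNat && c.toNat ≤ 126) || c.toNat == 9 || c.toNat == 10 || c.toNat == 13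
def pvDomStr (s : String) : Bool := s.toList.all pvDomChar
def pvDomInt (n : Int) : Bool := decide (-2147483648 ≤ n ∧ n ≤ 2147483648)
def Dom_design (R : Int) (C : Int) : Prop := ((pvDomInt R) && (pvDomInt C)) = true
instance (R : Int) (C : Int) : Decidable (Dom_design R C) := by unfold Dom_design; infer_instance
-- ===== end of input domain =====

-- B builds the mat in a single symmetric pass (each line from its distance to the middle row)
-- instead of A's top-half list plus a reversed mirror; objective: alternative decomposition.

-- ===== PORT A =====
-- Python str.center(w, f): exact for a non-empty fill; CPython pads marg = w - len with
-- left = marg//2 + (marg & w & 1) fill chars on the left (marg, w > 0 here, so the bitwise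
-- AND is 1 iff both marg and w are odd).
def pyCenter (s : String) (w : Int) (f : Char) : String :=
  let L := s.toList
  let len : Int := (L.length : Int)
  if w ≤ len then s
  else
    let marg := w - len
    let left := PySem.Int.floordiv marg 2 +
      (if PySem.Int.mod marg 2 = 1 ∧ PySem.Int.mod w 2 = 1 then 1 else 0)
    String.mk (List.replicate left.toNat f ++ L ++ List.replicate (marg - left).toNat f)

-- Python 's * k' (string repetition; empty for k ≤ 0) — exact via list repetition.
def strMul (s : String) (k : Int) : String := String.mk (PySem.List.pyRepeat s.toList k)

def design (R : Int) (C : Int) : List String :=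
  let lines := (PySem.List.pyRange 1 (PySem.Int.floordiv R 2 + 1) 1).foldl
    (fun acc n => acc ++ [pyCenter (strMul ".|." (n * 2 - 1)) C '-']) []
  let lines := lines ++ [pyCenter "WELCOME" C '-']
  lines ++ (PySem.List.slice lines none (some (-1))).reverse

-- ===== PORT B =====
def design_alt (R : Int) (C : Int) : List String :=
  let h := PySem.Int.floordiv R 2
  (PySem.List.pyRange 0 (2 * h + 1) 1).foldl
    (fun acc i => acc ++
      [if i = h then pyCenter "WELCOME" C '-'
       else
         let n := (if i < h then i else 2 * h - i) + 1
         pyCenter (strMul ".|." (2 * n - 1)) C '-']) []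

-- ===== PRECONDITION & SPEC =====
-- Pre_ restricts to the natural domain of non-negative row counts: for R < 0 A still
-- returns a stray single centered 'WELCOME' line (an artefact of appending it outside
-- the loop), while B naturally returns no lines.
def Pre_design (R : Int) (C : Int) : Prop := 0 ≤ R
instance (R : Int) (C : Int) : Decidable (Pre_design R C) := by unfold Pre_design; infer_instance
def pvWitness_design : Int × Int := (7, 9)

def Spec_design (R : Int) (C : Int) (out : List String) : Prop := out = design_alt R C
instance (R : Int) (C : Int) (out : List String) : Decidable (Spec_design R C out) := by unfold Spec_design; infer_instance

-- ===== CLAIM (what is proved, stated in full; the proofs are below) =====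
def Claim_equal_design : Prop := ∀ (R : Int) (C : Int), Dom_design R C → Pre_design R C → Spec_design R C (design R C)

-- ===== LEMMAS AND PROOFS =====

-- The single symmetric pass equals top-half ++ middle ++ reversed top-half.
theorem mirror_pass (m : Nat) (line : Int → String) (W : String) :
    (List.range (2 * m + 1)).map
      (fun (k : Nat) => if ((k : Int)) = (m : Int) then W
        else line (2 * ((if ((k : Int)) < (m : Int) then ((k : Int)) else 2 * (m : Int) - ((k : Int))) + 1) - 1))
    = ((List.range m).map (fun (k : Nat) => line ((1 + (k : Int)) * 2 - 1)) ++ [W])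
      ++ ((List.range m).map (fun (k : Nat) => line ((1 + (k : Int)) * 2 - 1))).reverse := by
  apply List.ext_getElem
  · simp; omega
  · intro j h1 h2
    simp only [List.length_map, List.length_range] at h1
    simp only [List.getElem_map, List.getElem_range]
    rcases lt_trichotomy j m with hj | hj | hj
    · rw [List.getElem_append_left (by simp; omega)]
      rw [List.getElem_append_left (by simp; omega)]
      simp only [List.getElem_map, List.getElem_range]
      rw [if_neg (by simp; omega), if_pos (by exact_mod_cast hj)]
      congr 1; ring
    · subst hj
      rw [List.getElem_append_left (by simp)]
      rw [List.getElem_append_right (by simp)]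
      simp
    · rw [List.getElem_append_right (by simp; omega)]
      rw [List.getElem_reverse]
      simp only [List.length_map, List.length_range, List.getElem_map, List.getElem_range,
        List.length_append, List.length_singleton]
      rw [if_neg (by simp; omega), if_neg (by simp; omega)]
      congr 1
      omega

-- ===== VERDICT (by name: the statement is the Claim_ definition above) =====
theorem design_spec : Claim_equal_design := by
  intro R C _ hpre
  unfold Spec_design design design_alt
  obtain ⟨m, hm⟩ : ∃ m : Nat, PySem.Int.floordiv R 2 = (m : Int) := by
    refine ⟨(PySem.Int.floordiv R 2).toNat, (Int.toNat_of_nonneg ?_).symm⟩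
    rw [PySem.Int.floordiv_eq_ediv_of_pos (by omega)]
    exact Int.ediv_nonneg hpre (by omega)
  simp only [hm]
  rw [PySem.List.foldl_append_singleton_eq_map, PySem.List.foldl_append_singleton_eq_map]
  rw [PySem.List.slice_to_neg_one]
  rw [List.dropLast_concat]
  have r1 : PySem.List.pyRange 1 ((m : Int) + 1) 1
      = (List.range m).map (fun (k : Nat) => (1 : Int) + (k : Int)) := by
    rw [PySem.List.pyRange_one]
    have : ((m : Int) + 1 - 1).toNat = m := by omega
    rw [this]
  have r2 : PySem.List.pyRange 0 (2 * (m : Int) + 1) 1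
      = (List.range (2 * m + 1)).map (fun (k : Nat) => ((0 : Int) + (k : Int))) := by
    rw [PySem.List.pyRange_one]
    have : ((2 * (m : Int) + 1 - 0).toNat) = 2 * m + 1 := by omega
    rw [this]
  rw [r1, r2, List.map_map, List.map_map, List.nil_append]
  simp only [Function.comp_def, zero_add, List.append_assoc]
  rw [← List.append_assoc]
  exact (mirror_pass m (fun t => pyCenter (strMul ".|." t) C '-') (pyCenter "WELCOME" C '-')).symm
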